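-- pv_equiv track=rewrite | github.com/kevinlandert/IC_RL_CW1_TabularReinforcementLearning | src/GridWorld.py | create_lists
-- ===== SOURCE A (Python) =====
-- def create_lists(trace,lists):
--
--     for episode in trace:
--
--         state_id,action,reward = episode
--
--         if (state_id,action) not in lists:
--             lists[(state_id,action)] = []
--
--         for state_action_pair in lists:
--             lists[state_action_pair].append(reward)
--
--     return lists
-- ===== SOURCE B (Python) =====
-- def create_lists(trace, lists):
--     trace = list(trace)
--     rewards = []
--     for episode in trace:
--         state_id, action, reward = episode
--         rewards.append(reward)
--     for key in lists:
--         lists[key].extend(rewards)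
--     for i, episode in enumerate(trace):
--         state_id, action, reward = episode
--         if (state_id, action) not in lists:
--             lists[(state_id, action)] = rewards[i:]
--     return lists
-- ===== Notes on version B (the rewrite author's own statement) =====
-- stated objective: faster
-- what changed: Replaces A's nested loop that appends each reward to every live key's list with one bulk extend of the pre-existing lists by the whole reward sequence plus a suffix slice rewards[i:] assigned at each key's first appearance.
import Mathlib
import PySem

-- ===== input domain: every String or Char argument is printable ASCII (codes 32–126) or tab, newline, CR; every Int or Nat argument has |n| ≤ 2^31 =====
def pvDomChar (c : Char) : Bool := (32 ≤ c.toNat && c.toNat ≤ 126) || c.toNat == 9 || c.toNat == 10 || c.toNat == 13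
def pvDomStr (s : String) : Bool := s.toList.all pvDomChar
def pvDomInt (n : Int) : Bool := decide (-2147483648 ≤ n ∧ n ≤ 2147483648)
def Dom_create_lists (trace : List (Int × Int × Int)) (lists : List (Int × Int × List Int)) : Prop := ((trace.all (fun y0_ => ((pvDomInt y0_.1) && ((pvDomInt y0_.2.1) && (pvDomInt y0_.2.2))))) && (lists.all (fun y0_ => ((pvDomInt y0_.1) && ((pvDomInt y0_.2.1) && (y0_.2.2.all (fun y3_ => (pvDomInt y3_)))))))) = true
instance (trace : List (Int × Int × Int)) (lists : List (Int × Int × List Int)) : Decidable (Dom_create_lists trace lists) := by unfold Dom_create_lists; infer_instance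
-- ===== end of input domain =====

-- B replaces A's per-step "append this reward to every live key" broadcast by one bulk extend of
-- the pre-existing lists plus a suffix slice rewards[i:] for each key first seen at index i
-- (objective: faster by a constant factor).  Both A and B mutate `lists` in place in Python in
-- the same way; the equivalence proved here is about the returned value.

-- `(state_id, action) in lists` (dict key membership)
def clKeyIn (d : List (Int × Int × List Int)) (s a : Int) : Bool :=
  d.any (fun e => e.1 == s && e.2.1 == a)

-- ===== PORT A =====
def create_lists (trace : List (Int × Int × Int)) (lists : List (Int × Int × List Int)) : List (Int × Int × List Int) :=
  trace.foldl
    (fun ls ep =>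
      -- state_id, action, reward = episode
      -- if (state_id, action) not in lists: lists[(state_id, action)] = []
      let ls1 := if clKeyIn ls ep.1 ep.2.1 then ls else ls ++ [(ep.1, ep.2.1, ([] : List Int))]
      -- for state_action_pair in lists: lists[pair].append(reward)
      ls1.map (fun e => (e.1, e.2.1, e.2.2 ++ [ep.2.2])))
    lists

-- ===== PORT B =====
def create_lists_alt (trace : List (Int × Int × Int)) (lists : List (Int × Int × List Int)) : List (Int × Int × List Int) :=
  let rewards := trace.map (fun ep => ep.2.2)
  -- for key in lists: lists[key].extend(rewards)
  let lists1 := lists.map (fun e => (e.1, e.2.1, e.2.2 ++ rewards))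
  -- for i, (s, a, r) in enumerate(trace): if (s, a) not in lists: lists[(s, a)] = rewards[i:]
  (PySem.List.enumerate trace 0).foldl
    (fun ls p =>
      if clKeyIn ls p.2.1 p.2.2.1 then ls
      else ls ++ [(p.2.1, p.2.2.1, PySem.List.slice rewards (some p.1) none)])
    lists1

-- ===== PRECONDITION & SPEC =====
def Spec_create_lists (trace : List (Int × Int × Int)) (lists : List (Int × Int × List Int)) (out : List (Int × Int × List Int)) : Prop := out = create_lists_alt trace lists
instance (trace : List (Int × Int × Int)) (lists : List (Int × Int × List Int)) (out : List (Int × Int × List Int)) : Decidable (Spec_create_lists trace lists out) := by unfold Spec_create_lists; infer_instance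

-- ===== CLAIM (what is proved, stated in full; the proofs are below) =====
def Claim_equal_create_lists : Prop := ∀ (trace : List (Int × Int × Int)) (lists : List (Int × Int × List Int)), Dom_create_lists trace lists → Spec_create_lists trace lists (create_lists trace lists)

-- ===== LEMMAS AND PROOFS =====

-- key membership is unchanged by rewriting the values
theorem clKeyIn_map (d : List (Int × Int × List Int)) (s a : Int)
    (g : Int × Int × List Int → List Int) :
    clKeyIn (d.map (fun e => (e.1, e.2.1, g e))) s a = clKeyIn d s a := by
  simp [clKeyIn, List.any_map, Function.comp_def]

-- shifting the enumeration start by one and dropping the head reward are the same thing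
theorem bloop_shift (t : List (Int × Int × Int)) (r : Int) (rt : List Int) :
    ∀ (k : ℕ) (acc : List (Int × Int × List Int)),
    (PySem.List.enumerate t ((k : Int) + 1)).foldl
      (fun ls p =>
        if clKeyIn ls p.2.1 p.2.2.1 then ls
        else ls ++ [(p.2.1, p.2.2.1, PySem.List.slice (r :: rt) (some p.1) none)]) acc
    = (PySem.List.enumerate t (k : Int)).foldl
      (fun ls p =>
        if clKeyIn ls p.2.1 p.2.2.1 then ls
        else ls ++ [(p.2.1, p.2.2.1, PySem.List.slice rt (some p.1) none)]) acc := by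
  induction t with
  | nil => intro k acc; simp [PySem.List.enumerate_nil]
  | cons x xs ih =>
    intro k acc
    rw [PySem.List.enumerate_cons, PySem.List.enumerate_cons]
    simp only [List.foldl_cons]
    have h1 : ((k : Int) + 1) = ((k + 1 : ℕ) : Int) := by push_cast; ring
    have hs : PySem.List.slice (r :: rt) (some ((k : Int) + 1)) none
        = PySem.List.slice rt (some (k : Int)) none := by
      rw [h1, PySem.List.slice_from_natCast, PySem.List.slice_from_natCast]
      simp
    rw [hs, h1]
    exact ih (k + 1) _

theorem main_eq (trace : List (Int × Int × Int)) :
    ∀ (d : List (Int × Int × List Int)),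
    create_lists trace d
    = (PySem.List.enumerate trace 0).foldl
        (fun ls p =>
          if clKeyIn ls p.2.1 p.2.2.1 then ls
          else ls ++ [(p.2.1, p.2.2.1,
            PySem.List.slice (trace.map (fun ep => ep.2.2)) (some p.1) none)])
        (d.map (fun e => (e.1, e.2.1, e.2.2 ++ trace.map (fun ep => ep.2.2)))) := by
  induction trace with
  | nil =>
    intro d
    simp [create_lists, PySem.List.enumerate_nil]
  | cons ep t ih =>
    intro d
    obtain ⟨s, a, r⟩ := ep
    have hstep : create_lists ((s, a, r) :: t) d
        = create_lists t
            ((if clKeyIn d s a then d else d ++ [(s, a, ([] : List Int))]).map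
              (fun e => (e.1, e.2.1, e.2.2 ++ [r]))) := by
      simp [create_lists]
    rw [hstep, ih]
    rw [PySem.List.enumerate_cons]
    simp only [List.foldl_cons, List.map_cons]
    have hz : ((0 : Int) + 1) = (((0 : ℕ) : Int) + 1) := by norm_num
    rw [hz, bloop_shift t r (t.map (fun ep => ep.2.2)) 0]
    norm_num
    congr 1
    -- the accumulators agree
    rw [clKeyIn_map d s a (fun e => e.2.2 ++ r :: t.map (fun ep => ep.2.2))]
    by_cases h : clKeyIn d s a = true
    · simp [h]
    · simp [h]

-- ===== VERDICT (by name: the statement is the Claim_ definition above) =====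
theorem create_lists_spec : Claim_equal_create_lists := by
  intro trace lists _
  unfold Spec_create_lists create_lists_alt
  exact main_eq trace lists
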